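-- pv_equiv track=rewrite | github.com/BaseThesis-Labs/evals | voice_evals/test2.py | _count_changed_words
-- ===== SOURCE A (Python) =====
-- def _count_changed_words(interim: str, final: str) -> int:
--     """
--     Count how many interim words were altered in the final transcript.
--
--     Uses a simple longest-common-subsequence approach: words on the LCS
--     are considered stable; the rest changed.
--     """
--     w_i = interim.lower().split()
--     w_f = final.lower().split()
--     if not w_i:
--         return 0
--     # LCS length via DP
--     m, n = len(w_i), len(w_f)
--     dp = [[0] * (n + 1) for _ in range(m + 1)]
--     for i in range(1, m + 1):
--         for j in range(1, n + 1):
--             if w_i[i-1] == w_f[j-1]: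
--                 dp[i][j] = dp[i-1][j-1] + 1
--             else:
--                 dp[i][j] = max(dp[i-1][j], dp[i][j-1])
--     stable = dp[m][n]
--     return m - stable   # unstable = interim words NOT in LCS
-- ===== SOURCE B (Python) =====
-- def _count_changed_words(interim: str, final: str) -> int:
--     """
--     Count how many interim words were altered in the final transcript.
--
--     Same LCS criterion, computed by the Hunt-Szymanski / patience method
--     instead of the DP table: index the positions of each final word once,
--     stream the interim words' match positions (per word, in decreasing
--     order) through a patience "tails" list maintained with binary search;
--     the tails length is the LCS length.
--     """
--     w_i = interim.lower().split()
--     w_f = final.lower().split()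
--     pos = {}
--     for j, w in enumerate(w_f):
--         pos.setdefault(w, []).append(j)
--     tails = []
--     for w in w_i:
--         for j in reversed(pos.get(w, ())):
--             lo, hi = 0, len(tails)
--             while lo < hi:
--                 mid = (lo + hi) // 2
--                 if tails[mid] < j:
--                     lo = mid + 1
--                 else:
--                     hi = mid
--             if lo == len(tails):
--                 tails.append(j)
--             else:
--                 tails[lo] = j
--     return len(w_i) - len(tails)
-- ===== Notes on version B (the rewrite author's own statement) =====
-- stated objective: alternative
-- what changed: Replaces the bottom-up (m+1)x(n+1) DP table (with its empty-interim guard) by the Hunt-Szymanski / patience method: a dictionary indexing each final word's positions is built once, then each interim word's match positions are streamed (in decreasing order) through a 'tails' list maintained with hand-written binary search, whose final length is the LCS length.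
import Mathlib
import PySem

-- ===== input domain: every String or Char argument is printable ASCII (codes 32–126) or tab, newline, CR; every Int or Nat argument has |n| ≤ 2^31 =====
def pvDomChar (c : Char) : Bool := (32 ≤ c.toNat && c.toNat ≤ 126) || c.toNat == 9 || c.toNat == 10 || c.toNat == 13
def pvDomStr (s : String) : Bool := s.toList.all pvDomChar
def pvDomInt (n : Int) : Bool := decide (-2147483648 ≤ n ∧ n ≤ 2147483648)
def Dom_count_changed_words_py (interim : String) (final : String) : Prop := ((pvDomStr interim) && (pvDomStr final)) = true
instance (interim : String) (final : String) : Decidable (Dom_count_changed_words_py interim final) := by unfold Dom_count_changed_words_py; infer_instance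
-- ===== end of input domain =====

-- B replaces A's full (m+1)×(n+1) DP table by the Hunt–Szymanski / patience method: index each final
-- word's positions once, stream the interim words' match positions (per word in decreasing order)
-- through a binary-searched "tails" list; the return values are proved equal on all inputs.

-- ===== PORT A =====
-- A's mutable table dp is carried as the list of its completed rows: A writes dp[i][j] exactly once,
-- left to right and top to bottom, and reads only dp[i-1][*] and dp[i][j-1] (already-written cells),
-- so the still-zero rows of the initialiser are never read before being overwritten; the same cell
-- values are computed in the same order.
def count_changed_words_py (interim : String) (final : String) : Int :=
  let w_i := PySem.Str.split₀ (PySem.Str.lower interim)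
  let w_f := PySem.Str.split₀ (PySem.Str.lower final)
  if w_i = [] then 0
  else
    let m : Int := w_i.length
    let n : Int := w_f.length
    let dp : List (List Int) :=
      (PySem.List.pyRange 1 (m+1) 1).foldl (fun dp i =>
        dp ++ [(PySem.List.pyRange 1 (n+1) 1).foldl (fun row j =>
          if PySem.List.pyGetD w_i (i-1) "" = PySem.List.pyGetD w_f (j-1) "" then
            row ++ [PySem.List.pyGetD (PySem.List.pyGetD dp (i-1) []) (j-1) 0 + 1]
          else
            row ++ [max (PySem.List.pyGetD (PySem.List.pyGetD dp (i-1) []) j 0)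
                        (PySem.List.pyGetD row (j-1) 0)])
          [0]])
        [List.replicate (n+1).toNat 0]
    let stable := PySem.List.pyGetD (PySem.List.pyGetD dp m []) n 0
    m - stable

-- ===== PORT B =====
-- B-side helper: the hand-written binary search of Source B (lo, hi bisection), step for step.
def pvBsearch (tails : List Int) (j : Int) (lo hi : Int) : Int :=
  if h : lo < hi then
    let mid := PySem.Int.floordiv (lo + hi) 2
    if PySem.List.pyGetD tails mid 0 < j then pvBsearch tails j (mid + 1) hi
    else pvBsearch tails j lo mid
  else lo
termination_by (hi - lo).toNat
decreasing_by
  · have hb2 := PySem.Int.le_floordiv_iff_mul_le (a := lo + hi) (b := 2) (q := lo) (by omega)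
    omega
  · have hb := PySem.Int.floordiv_lt_iff_lt_mul (a := lo + hi) (b := 2) (q := hi) (by omega)
    omega

def count_changed_words_py_alt (interim : String) (final : String) : Int :=
  let w_i := PySem.Str.split₀ (PySem.Str.lower interim)
  let w_f := PySem.Str.split₀ (PySem.Str.lower final)
  let pos : PySem.Dict String (List Int) :=
    (PySem.List.enumerate w_f 0).foldl
      (fun d jw => d.modify jw.2 [] (· ++ [jw.1])) PySem.Dict.empty
  let tails := w_i.foldl (fun tails w =>
    ((pos.getD w []).reverse).foldl (fun tails j =>
      let lo := pvBsearch tails j 0 tails.length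
      if lo = (tails.length : Int) then tails ++ [j]
      else PySem.List.pySetD tails lo j) tails) ([] : List Int)
  (w_i.length : Int) - tails.length

-- ===== PRECONDITION & SPEC =====
def Spec_count_changed_words_py (interim : String) (final : String) (out : Int) : Prop := out = count_changed_words_py_alt interim final
instance (interim : String) (final : String) (out : Int) : Decidable (Spec_count_changed_words_py interim final out) := by unfold Spec_count_changed_words_py; infer_instance

-- ===== CLAIM (what is proved, stated in full; the proofs are below) =====
def Claim_equal_count_changed_words_py : Prop := ∀ (interim : String) (final : String), Dom_count_changed_words_py interim final → Spec_count_changed_words_py interim final (count_changed_words_py interim final)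

-- ===== LEMMAS AND PROOFS =====

-- The common specification: lcsP wi wf i j = LCS length of the first i words of wi and the first j
-- of wf, by the standard prefix recurrence (A fills this matrix by rows; B computes, per interim
-- word, its column-wise effect through the patience tails list).
def lcsP (wi wf : List String) : Nat → Nat → Int
  | 0, _ => 0
  | _+1, 0 => 0
  | i+1, j+1 =>
    if wi.getD i "" = wf.getD j "" then lcsP wi wf i j + 1
    else max (lcsP wi wf i (j+1)) (lcsP wi wf (i+1) j)
  termination_by i j => (i, j)

theorem lcsP_zero (wi wf : List String) (j : Nat) : lcsP wi wf 0 j = 0 := by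
  cases j <;> simp [lcsP]

theorem lcsP_zero_right (wi wf : List String) (i : Nat) : lcsP wi wf i 0 = 0 := by
  cases i <;> simp [lcsP]

-- ---------- A-side: the table fold computes lcsP row by row ----------

theorem foldl_range_inv {α : Type} (f : α → Int → α) (P : Nat → α) (a n : Nat) (han : a ≤ n)
    (hf : ∀ t, a ≤ t → t < n → f (P t) ((t : Int)+1) = P (t+1)) :
    (PySem.List.pyRange ((a : Int)+1) ((n : Int)+1) 1).foldl f (P a) = P n := by
  obtain ⟨d, rfl⟩ : ∃ d, n = a + d := ⟨n - a, by omega⟩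
  clear han
  induction d generalizing a with
  | zero =>
    rw [PySem.List.pyRange_one_eq_nil (by push_cast; omega)]
    simp
  | succ d ih =>
    rw [PySem.List.pyRange_one_cons (by push_cast; omega), List.foldl_cons,
      hf a le_rfl (by omega)]
    have h1 : ((a : Int) + 1 + 1) = ((a+1 : Nat) : Int) + 1 := by push_cast; ring
    have h2 : ((a + (d+1) : Nat) : Int) + 1 = (((a+1) + d : Nat) : Int) + 1 := by push_cast; ring
    have h3 : a + (d + 1) = (a + 1) + d := by omega
    rw [h1, h2, h3]
    exact ih (a+1) (fun t ht htn => hf t (by omega) (by omega))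

theorem getD_map_range_lt {α : Type} (f : Nat → α) (n k : Nat) (h : k < n) (d : α) :
    ((List.range n).map f).getD k d = f k := by
  rw [List.getD_eq_getElem?_getD]
  simp [h]

theorem map_range_succ {α : Type} (f : Nat → α) (n : Nat) :
    (List.range (n+1)).map f = (List.range n).map f ++ [f n] := by
  rw [List.range_succ, List.map_append]; rfl

def rowF (wi wf : List String) (i : Nat) : List Int :=
  (List.range (wf.length + 1)).map (fun j => lcsP wi wf i j)

theorem rowF_getD (wi wf : List String) (i k : Nat) (h : k < wf.length + 1) :
    (rowF wi wf i).getD k 0 = lcsP wi wf i k := by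
  unfold rowF
  rw [getD_map_range_lt _ _ _ h]

theorem innerA (wi wf : List String) (i : Nat) :
    (PySem.List.pyRange 1 ((wf.length : Int)+1) 1).foldl (fun row j =>
        if wi.getD i "" = PySem.List.pyGetD wf (j-1) "" then
          row ++ [PySem.List.pyGetD (rowF wi wf i) (j-1) 0 + 1]
        else
          row ++ [max (PySem.List.pyGetD (rowF wi wf i) j 0)
                      (PySem.List.pyGetD row (j-1) 0)])
      [0] = rowF wi wf (i+1) := by
  have hstep : ∀ t : Nat, 0 ≤ t → t < wf.length →
      (fun row j =>
        if wi.getD i "" = PySem.List.pyGetD wf (j-1) "" then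
          row ++ [PySem.List.pyGetD (rowF wi wf i) (j-1) 0 + 1]
        else
          row ++ [max (PySem.List.pyGetD (rowF wi wf i) j 0)
                      (PySem.List.pyGetD row (j-1) 0)])
        ((List.range (t+1)).map (fun j => lcsP wi wf (i+1) j)) ((t : Int)+1)
      = (List.range (t+1+1)).map (fun j => lcsP wi wf (i+1) j) := by
    intro t ht htn
    have e1 : ((t : Int) + 1 - 1) = ((t : Nat) : Int) := by ring
    have e2 : ((t : Int) + 1) = ((t+1 : Nat) : Int) := by push_cast; ring
    simp only []
    rw [e1, e2]
    simp only [PySem.List.pyGetD_natCast]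
    rw [rowF_getD _ _ _ _ (by omega), rowF_getD _ _ _ _ (by omega),
      getD_map_range_lt _ _ _ (by omega)]
    by_cases hc : wi.getD i "" = wf.getD t ""
    · rw [if_pos hc]
      have hv : lcsP wi wf (i+1) (t+1) = lcsP wi wf i t + 1 := by
        rw [lcsP, if_pos hc]
      have hrow : (List.range (t+1)).map (fun j => lcsP wi wf (i+1) j) ++ [lcsP wi wf (i+1) (t+1)]
          = (List.range (t+1+1)).map (fun j => lcsP wi wf (i+1) j) := by
        conv_rhs => rw [map_range_succ]
      rw [← hv] at *
      rw [hrow]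
    · rw [if_neg hc]
      have hv : lcsP wi wf (i+1) (t+1) = max (lcsP wi wf i (t+1)) (lcsP wi wf (i+1) t) := by
        rw [lcsP, if_neg hc]
      have hrow : (List.range (t+1)).map (fun j => lcsP wi wf (i+1) j) ++ [lcsP wi wf (i+1) (t+1)]
          = (List.range (t+1+1)).map (fun j => lcsP wi wf (i+1) j) := by
        conv_rhs => rw [map_range_succ]
      rw [← hv] at *
      rw [hrow]
  have h := foldl_range_inv
    (f := fun row j =>
        if wi.getD i "" = PySem.List.pyGetD wf (j-1) "" then
          row ++ [PySem.List.pyGetD (rowF wi wf i) (j-1) 0 + 1]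
        else
          row ++ [max (PySem.List.pyGetD (rowF wi wf i) j 0)
                      (PySem.List.pyGetD row (j-1) 0)])
    (P := fun t => (List.range (t+1)).map (fun j => lcsP wi wf (i+1) j))
    0 wf.length (Nat.zero_le _) hstep
  simpa [lcsP_zero_right, rowF] using h

theorem outerA (wi wf : List String) :
    (PySem.List.pyRange 1 ((wi.length : Int)+1) 1).foldl (fun dp i =>
        dp ++ [(PySem.List.pyRange 1 ((wf.length : Int)+1) 1).foldl (fun row j =>
          if PySem.List.pyGetD wi (i-1) "" = PySem.List.pyGetD wf (j-1) "" then
            row ++ [PySem.List.pyGetD (PySem.List.pyGetD dp (i-1) []) (j-1) 0 + 1]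
          else
            row ++ [max (PySem.List.pyGetD (PySem.List.pyGetD dp (i-1) []) j 0)
                        (PySem.List.pyGetD row (j-1) 0)])
          [0]])
      [List.replicate (((wf.length : Int))+1).toNat 0]
      = (List.range (wi.length + 1)).map (fun k => rowF wi wf k) := by
  have hstep : ∀ t : Nat, 0 ≤ t → t < wi.length →
      (fun dp i =>
        dp ++ [(PySem.List.pyRange 1 ((wf.length : Int)+1) 1).foldl (fun row j =>
          if PySem.List.pyGetD wi (i-1) "" = PySem.List.pyGetD wf (j-1) "" then
            row ++ [PySem.List.pyGetD (PySem.List.pyGetD dp (i-1) []) (j-1) 0 + 1]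
          else
            row ++ [max (PySem.List.pyGetD (PySem.List.pyGetD dp (i-1) []) j 0)
                        (PySem.List.pyGetD row (j-1) 0)])
          [0]])
        ((List.range (t+1)).map (fun k => rowF wi wf k)) ((t : Int)+1)
      = (List.range (t+1+1)).map (fun k => rowF wi wf k) := by
    intro t ht htn
    have e1 : ((t : Int) + 1 - 1) = ((t : Nat) : Int) := by ring
    simp only []
    rw [e1]
    simp only [PySem.List.pyGetD_natCast]
    have hdp : ((List.range (t+1)).map (fun k => rowF wi wf k)).getD t ([] : List Int)
        = rowF wi wf t := by
      rw [getD_map_range_lt _ _ _ (by omega)]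
    rw [hdp, innerA wi wf t]
    have hrow : (List.range (t+1)).map (fun k => rowF wi wf k) ++ [rowF wi wf (t+1)]
        = (List.range (t+1+1)).map (fun k => rowF wi wf k) := by
      conv_rhs => rw [map_range_succ]
    rw [hrow]
  have h := foldl_range_inv
    (f := fun dp i =>
        dp ++ [(PySem.List.pyRange 1 ((wf.length : Int)+1) 1).foldl (fun row j =>
          if PySem.List.pyGetD wi (i-1) "" = PySem.List.pyGetD wf (j-1) "" then
            row ++ [PySem.List.pyGetD (PySem.List.pyGetD dp (i-1) []) (j-1) 0 + 1]
          else
            row ++ [max (PySem.List.pyGetD (PySem.List.pyGetD dp (i-1) []) j 0)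
                        (PySem.List.pyGetD row (j-1) 0)])
          [0]])
    (P := fun t => (List.range (t+1)).map (fun k => rowF wi wf k))
    0 wi.length (Nat.zero_le _) hstep
  have ht : (((wf.length : Int))+1).toNat = wf.length + 1 := by omega
  simpa [ht, rowF, lcsP_zero, List.map_const'] using h

-- A computes len(w_i) - lcsP m n (in both branches of its guard).
theorem a_eq (interim final : String) :
    count_changed_words_py interim final =
      ((PySem.Str.split₀ (PySem.Str.lower interim)).length : Int) -
        lcsP (PySem.Str.split₀ (PySem.Str.lower interim)) (PySem.Str.split₀ (PySem.Str.lower final))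
          (PySem.Str.split₀ (PySem.Str.lower interim)).length
          (PySem.Str.split₀ (PySem.Str.lower final)).length := by
  simp only [count_changed_words_py]
  set wi := PySem.Str.split₀ (PySem.Str.lower interim) with hwi
  set wf := PySem.Str.split₀ (PySem.Str.lower final) with hwf
  by_cases hnil : wi = []
  · rw [if_pos hnil, hnil]
    simp [lcsP_zero]
  · rw [if_neg hnil, outerA wi wf]
    simp only [PySem.List.pyGetD_natCast]
    have hdp : ((List.range (wi.length + 1)).map (fun k => rowF wi wf k)).getD wi.length ([] : List Int)
        = rowF wi wf wi.length := by
      rw [getD_map_range_lt _ _ _ (by omega)]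
    rw [hdp, rowF_getD _ _ _ _ (by omega)]

-- ---------- B-side: patience tails compute lcsP column-effect by column-effect ----------

-- Basic lcsP facts: nonnegativity, monotonicity and 1-Lipschitz in each argument.
theorem lcsP_nonneg (wi wf : List String) : ∀ s i j, i + j ≤ s → 0 ≤ lcsP wi wf i j := by
  intro s
  induction s with
  | zero =>
    intro i j h
    have : i = 0 := by omega
    subst this; simp [lcsP_zero]
  | succ s ih =>
    intro i j h
    match i, j with
    | 0, j => simp [lcsP_zero]
    | i+1, 0 => simp [lcsP_zero_right]
    | i+1, j+1 =>
      rw [lcsP]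
      split_ifs with hc
      · have := ih i j (by omega); omega
      · have := ih i (j+1) (by omega)
        exact le_trans this (le_max_left _ _)

theorem lcsP_nn (wi wf : List String) (i j : Nat) : 0 ≤ lcsP wi wf i j :=
  lcsP_nonneg wi wf (i+j) i j le_rfl

-- P(i,j): mono in j;  Q'(i,j): Lipschitz in i.
theorem lcsP_PQ' (wi wf : List String) : ∀ s i j, i + j ≤ s →
    lcsP wi wf i j ≤ lcsP wi wf i (j+1) ∧ lcsP wi wf (i+1) j ≤ lcsP wi wf i j + 1 := by
  intro s
  induction s with
  | zero =>
    intro i j h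
    have hi : i = 0 := by omega
    have hj : j = 0 := by omega
    subst hi; subst hj
    constructor
    · simp [lcsP_zero]
    · simp [lcsP_zero_right]
  | succ s ih =>
    intro i j h
    by_cases hle : i + j ≤ s
    · exact ih i j hle
    constructor
    · -- P(i,j): lcsP i j ≤ lcsP i (j+1)
      match i, j with
      | 0, j => simp [lcsP_zero]
      | i+1, 0 =>
        rw [lcsP_zero_right]
        exact lcsP_nn wi wf (i+1) 1
      | i+1, j+1 =>
        conv_rhs => rw [lcsP]
        split_ifs with hc
        · -- rhs = lcsP i (j+1) + 1 ; lhs ≤ it by Q'(i, j+1)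
          exact (ih i (j+1) (by omega)).2
        · exact le_max_right _ _
    · -- Q'(i,j): lcsP (i+1) j ≤ lcsP i j + 1
      match i, j with
      | i, 0 =>
        rw [lcsP_zero_right, lcsP_zero_right]
        omega
      | i, j+1 =>
        rw [lcsP]
        split_ifs with hc
        · have hP := (ih i j (by omega)).1
          omega
        · have h1 : lcsP wi wf i (j+1) ≤ lcsP wi wf i (j+1) + 1 := by omega
          have h2 : lcsP wi wf (i+1) j ≤ lcsP wi wf i j + 1 := (ih i j (by omega)).2
          have h3 : lcsP wi wf i j ≤ lcsP wi wf i (j+1) := (ih i j (by omega)).1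
          have : lcsP wi wf (i+1) j ≤ lcsP wi wf i (j+1) + 1 := by omega
          omega

-- Q(i,j): Lipschitz in j;  P'(i,j): mono in i.
theorem lcsP_QP' (wi wf : List String) : ∀ s i j, i + j ≤ s →
    lcsP wi wf i (j+1) ≤ lcsP wi wf i j + 1 ∧ lcsP wi wf i j ≤ lcsP wi wf (i+1) j := by
  intro s
  induction s with
  | zero =>
    intro i j h
    have hi : i = 0 := by omega
    have hj : j = 0 := by omega
    subst hi; subst hj
    constructor
    · simp [lcsP_zero]
    · simp [lcsP_zero_right]
  | succ s ih =>
    intro i j h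
    by_cases hle : i + j ≤ s
    · exact ih i j hle
    constructor
    · -- Q(i,j): lcsP i (j+1) ≤ lcsP i j + 1
      match i, j with
      | 0, j => simp [lcsP_zero]
      | i+1, j =>
        rw [lcsP]
        split_ifs with hc
        · have hP' := (ih i j (by omega)).2
          omega
        · have h1 : lcsP wi wf i (j+1) ≤ lcsP wi wf i j + 1 := (ih i j (by omega)).1
          have h2 : lcsP wi wf i j ≤ lcsP wi wf (i+1) j := (ih i j (by omega)).2
          have h3 : lcsP wi wf (i+1) j ≤ lcsP wi wf (i+1) j + 1 := by omega
          omega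
    · -- P'(i,j): lcsP i j ≤ lcsP (i+1) j
      match i, j with
      | i, 0 => simp [lcsP_zero_right]
      | i, j+1 =>
        conv_rhs => rw [lcsP]
        split_ifs with hc
        · have hQ := (ih i j (by omega)).1
          omega
        · exact le_max_left _ _

theorem lcsP_mono_le (wi wf : List String) (i : Nat) {j1 j2 : Nat} (h : j1 ≤ j2) :
    lcsP wi wf i j1 ≤ lcsP wi wf i j2 := by
  induction j2 with
  | zero =>
    have hz : j1 = 0 := by omega
    subst hz; exact le_rfl
  | succ j2 ih =>
    rcases Nat.lt_or_ge j1 (j2+1) with h' | h'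
    · exact le_trans (ih (by omega)) (lcsP_PQ' wi wf (i+j2) i j2 le_rfl).1
    · have : j1 = j2 + 1 := by omega
      subst this; exact le_rfl

-- Count-below function of a tails list and its characterisation on sorted lists.
def cntf (t : List Int) (x : Int) : Int := (t.countP (fun e => decide (e < x)) : Int)

theorem sorted_countP (t : List Int) (ht : t.Pairwise (· < ·)) (j : Int) :
    ∀ k (hk : k < t.length), (t[k] < j ↔ k < t.countP (fun e => decide (e < j))) := by
  induction t with
  | nil => intro k hk; simp at hk
  | cons a t ih =>
    have hta : ∀ e ∈ t, a < e := by
      intro e he; exact (List.pairwise_cons.mp ht).1 e he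
    have ht' : t.Pairwise (· < ·) := (List.pairwise_cons.mp ht).2
    have hcnt0 : ¬ a < j → t.countP (fun e => decide (e < j)) = 0 := by
      intro ha
      rw [List.countP_eq_zero]
      intro e he
      have := hta e he
      simp only [decide_eq_true_eq]
      omega
    intro k hk
    match k with
    | 0 =>
      simp only [List.getElem_cons_zero, List.countP_cons]
      constructor
      · intro haj; simp [haj]
      · intro hpos
        by_contra ha
        rw [hcnt0 ha] at hpos
        simp [ha] at hpos
    | k+1 =>
      simp only [List.getElem_cons_succ, List.countP_cons]
      have hk' : k < t.length := by simpa using hk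
      rw [ih ht' k hk']
      by_cases ha : a < j
      · simp [ha]
      · rw [hcnt0 ha]
        simp [ha]

-- The hand-written bisection returns the count of entries below j.
theorem pvBsearch_eq (t : List Int) (j : Int) (c : Nat)
    (hc : ∀ k (hk : k < t.length), (t[k] < j ↔ k < c)) :
    ∀ N (lo hi : Int), (hi - lo).toNat ≤ N → 0 ≤ lo → hi ≤ (t.length : Int) →
      lo ≤ (c : Int) → (c : Int) ≤ hi → pvBsearch t j lo hi = (c : Int) := by
  intro N
  induction N with
  | zero =>
    intro lo hi hN h0 hhi hlc hch
    rw [pvBsearch, dif_neg (by omega)]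
    omega
  | succ N ih =>
    intro lo hi hN h0 hhi hlc hch
    by_cases hlh : lo < hi
    · rw [pvBsearch, dif_pos hlh]
      have hmid1 : lo ≤ PySem.Int.floordiv (lo + hi) 2 := by
        rw [PySem.Int.le_floordiv_iff_mul_le (by omega)]; omega
      have hmid2 : PySem.Int.floordiv (lo + hi) 2 < hi := by
        rw [PySem.Int.floordiv_lt_iff_lt_mul (by omega)]; omega
      set mid := PySem.Int.floordiv (lo + hi) 2 with hmiddef
      have hmnn : 0 ≤ mid := by omega
      have hmlen : mid.toNat < t.length := by omega
      have hget : PySem.List.pyGetD t mid 0 = t[mid.toNat] := by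
        rw [PySem.List.pyGetD_of_nonneg _ _ hmnn, List.getD_eq_getElem?_getD,
          List.getElem?_eq_getElem hmlen]
        rfl
      show (if PySem.List.pyGetD t mid 0 < j then pvBsearch t j (mid + 1) hi
        else pvBsearch t j lo mid) = (c : Int)
      rw [hget]
      by_cases hlt : t[mid.toNat] < j
      · rw [if_pos hlt]
        have hmc : mid.toNat < c := (hc _ hmlen).mp hlt
        exact ih (mid+1) hi (by omega) (by omega) hhi (by omega) hch
      · rw [if_neg hlt]
        have hmc : c ≤ mid.toNat := by
          have := hc _ hmlen
          omega
        exact ih lo mid (by omega) h0 (by omega) hlc (by omega)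
    · rw [pvBsearch, dif_neg hlh]
      omega

theorem pvBsearch_cnt (t : List Int) (ht : t.Pairwise (· < ·)) (j : Int) :
    pvBsearch t j 0 (t.length : Int) = cntf t j := by
  have hcle : t.countP (fun e => decide (e < j)) ≤ t.length := List.countP_le_length ..
  exact pvBsearch_eq t j _ (sorted_countP t ht j) ((t.length:Int) - 0).toNat 0 (t.length : Int)
    le_rfl le_rfl le_rfl (by omega) (by exact_mod_cast hcle)

-- One patience step: state invariant and the abstract effect on counts.
def SInvP (n : Int) (t : List Int) : Prop := t.Pairwise (· < ·) ∧ ∀ e ∈ t, 0 ≤ e ∧ e < n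

def pstep (t : List Int) (j : Int) : List Int :=
  let lo := pvBsearch t j 0 t.length
  if lo = (t.length : Int) then t ++ [j] else PySem.List.pySetD t lo j

def astep (h : Int → Int) (j : Int) : Int → Int :=
  fun x => if x ≤ j then h x else max (h x) (h j + 1)

theorem countP_set_add (t : List Int) (p : Int → Bool) (v : Int) :
    ∀ k (hk : k < t.length),
      (t.set k v).countP p + (if p t[k] then 1 else 0) = t.countP p + (if p v then 1 else 0) := by
  induction t with
  | nil => intro k hk; simp at hk
  | cons a t ih =>
    intro k hk
    match k with
    | 0 => simp [List.countP_cons]; split_ifs <;> omega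
    | k+1 =>
      have hk' : k < t.length := by simpa using hk
      simp only [List.set_cons_succ, List.countP_cons, List.getElem_cons_succ]
      have := ih k hk'
      split_ifs at this ⊢ <;> omega

theorem pstep_spec (n : Int) (t : List Int) (j : Int) (hs : SInvP n t) (hj0 : 0 ≤ j) (hjn : j < n) :
    SInvP n (pstep t j) ∧ ∀ x : Int, cntf (pstep t j) x = astep (cntf t) j x := by
  obtain ⟨hpw, hbd⟩ := hs
  have hch := sorted_countP t hpw j
  set cN := t.countP (fun e => decide (e < j)) with hcdef
  have hcle : cN ≤ t.length := List.countP_le_length ..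
  have hlo : pvBsearch t j 0 (t.length : Int) = (cN : Int) := pvBsearch_cnt t hpw j
  have hps : pstep t j =
      if (cN : Int) = (t.length : Int) then t ++ [j] else PySem.List.pySetD t (cN : Int) j := by
    show (if pvBsearch t j 0 (t.length : Int) = ((t.length : Nat) : Int) then t ++ [j]
      else PySem.List.pySetD t (pvBsearch t j 0 (t.length : Int)) j) = _
    rw [hlo]
  by_cases hce : cN = t.length
  · -- append case
    have hall : ∀ e ∈ t, e < j := by
      intro e he
      obtain ⟨k, hk, rfl⟩ := List.mem_iff_getElem.mp he
      exact (hch k hk).mpr (by omega)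
    rw [hps, if_pos (by exact_mod_cast congrArg (Nat.cast : Nat → Int) hce)]
    refine ⟨⟨?_, ?_⟩, ?_⟩
    · rw [List.pairwise_append]
      exact ⟨hpw, List.pairwise_singleton _ _, by
        intro a ha b hb
        rw [List.mem_singleton] at hb
        subst hb
        exact hall a ha⟩
    · intro e he
      rcases List.mem_append.mp he with he' | he'
      · exact hbd e he'
      · rw [List.mem_singleton] at he'
        subst he'
        exact ⟨hj0, hjn⟩
    · intro x
      simp only [cntf, astep, List.countP_append, List.countP_cons, List.countP_nil]
      by_cases hxj : x ≤ j
      · rw [if_pos hxj]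
        have : (decide (j < x)) = false := by simp; omega
        rw [this]
        push_cast
        omega
      · rw [if_neg hxj]
        have hjx : (decide (j < x)) = true := by simp; omega
        rw [hjx]
        have hfull : t.countP (fun e => decide (e < x)) = t.length := by
          rw [List.countP_eq_length]
          intro e he
          have := hall e he
          simp only [decide_eq_true_eq]
          omega
        rw [hfull, ← hce, max_eq_right (by omega), ← hcdef]
        simp
  · -- replace case
    have hclt : cN < t.length := by omega
    have htc : ¬ t[cN] < j := by
      have := hch cN hclt
      omega
    rw [hps, if_neg (by
      intro hcon
      exact hce (by exact_mod_cast hcon))]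
    rw [PySem.List.pySetD_natCast]
    have hpgold := List.pairwise_iff_getElem.mp hpw
    have hpw' : (t.set cN j).Pairwise (· < ·) := by
      rw [List.pairwise_iff_getElem]
      intro a b ha hb hab
      simp only [List.length_set] at ha hb
      rw [List.getElem_set, List.getElem_set]
      by_cases hbc : cN = b
      · subst hbc
        rw [if_pos rfl, if_neg (by omega)]
        exact (hch a (by omega)).mpr (by omega)
      · rw [if_neg hbc]
        by_cases hac : cN = a
        · subst hac
          rw [if_pos rfl]
          have h1 : t[cN] < t[b] := hpgold cN b ha hb hab
          omega
        · rw [if_neg hac]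
          exact hpgold a b ha hb hab
    refine ⟨⟨hpw', ?_⟩, ?_⟩
    · intro e he
      rcases List.mem_or_eq_of_mem_set he with he' | he'
      · exact hbd e he'
      · subst he'
        exact ⟨hj0, hjn⟩
    · intro x
      have hadd := countP_set_add t (fun e => decide (e < x)) j cN hclt
      have hchx := sorted_countP t hpw x
      simp only [cntf, astep]
      by_cases hxj : x ≤ j
      · rw [if_pos hxj]
        have h1 : (decide (j < x)) = false := by simp; omega
        have h2 : (decide (t[cN] < x)) = false := by simp; omega
        rw [h1, h2] at hadd
        simp at hadd
        rw [hadd]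
      · rw [if_neg hxj]
        have hjx : j < x := by omega
        have h1 : (decide (j < x)) = true := by simp; omega
        rw [h1] at hadd
        by_cases htx : t[cN] < x
        · have h2 : (decide (t[cN] < x)) = true := by simp [htx]
          rw [h2] at hadd
          have h3 : cN < t.countP (fun e => decide (e < x)) := (hchx cN hclt).mp htx
          rw [← hcdef, max_eq_left (by omega)]
          simp at hadd
          omega
        · have h2 : (decide (t[cN] < x)) = false := by simp; omega
          rw [h2] at hadd
          have hle : t.countP (fun e => decide (e < x)) ≤ cN := by
            by_contra hcon
            exact htx ((hchx cN hclt).mpr (by omega))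
          have hge : cN ≤ t.countP (fun e => decide (e < x)) := by
            by_contra hcon
            have hk : t.countP (fun e => decide (e < x)) < t.length := by omega
            have hkx : ¬ t[t.countP (fun e => decide (e < x))] < x := by
              have := hchx _ hk
              omega
            have hkj : t[t.countP (fun e => decide (e < x))] < j :=
              (hch _ hk).mpr (by omega)
            omega
          have heq : t.countP (fun e => decide (e < x)) = cN := by omega
          rw [← hcdef, heq, max_eq_right (by omega)]
          simp at hadd
          omega

-- Folding patience steps simulates folding abstract steps on the count function.
theorem fold_pstep_spec (n : Int) : ∀ (L : List Int) (t : List Int), SInvP n t →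
    (∀ j ∈ L, 0 ≤ j ∧ j < n) →
    SInvP n (L.foldl pstep t) ∧ ∀ x, cntf (L.foldl pstep t) x = (L.foldl astep (cntf t)) x := by
  intro L
  induction L with
  | nil => exact fun t hs _ => ⟨hs, fun x => rfl⟩
  | cons j L ih =>
    intro t hs hL
    simp only [List.foldl_cons]
    have hj := hL j List.mem_cons_self
    have hp := pstep_spec n t j hs hj.1 hj.2
    have hrec := ih (pstep t j) hp.1 (fun a ha => hL a (List.mem_cons_of_mem _ ha))
    refine ⟨hrec.1, ?_⟩
    intro x
    rw [hrec.2 x]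
    have hfe : cntf (pstep t j) = astep (cntf t) j := funext hp.2
    rw [hfe]

-- Abstract folds only look at their argument inside [0, n].
theorem afold_congr (n : Int) : ∀ (L : List Int) (h h' : Int → Int),
    (∀ y, 0 ≤ y → y ≤ n → h y = h' y) → (∀ j ∈ L, 0 ≤ j ∧ j < n) →
    ∀ x, 0 ≤ x → x ≤ n → (L.foldl astep h) x = (L.foldl astep h') x := by
  intro L
  induction L with
  | nil => exact fun h h' hag _ x hx0 hxn => hag x hx0 hxn
  | cons j L ih =>
    intro h h' hag hL x hx0 hxn
    simp only [List.foldl_cons]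
    have hj := hL j List.mem_cons_self
    refine ih (astep h j) (astep h' j) ?_ (fun a ha => hL a (List.mem_cons_of_mem _ ha)) x hx0 hxn
    intro y hy0 hyn
    simp only [astep]
    rw [hag y hy0 hyn, hag j hj.1 (by omega)]

-- Max-fold helpers.
def mfold (g : Int → Int) (L : List Int) (b : Int) : Int :=
  L.foldr (fun j acc => max (g j) acc) b

theorem mfold_le (g : Int → Int) (L : List Int) (b c : Int)
    (hm : ∀ j ∈ L, g j ≤ c) (hb : b ≤ c) : mfold g L b ≤ c := by
  induction L with
  | nil => exact hb
  | cons a L ih =>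
    simp only [mfold, List.foldr_cons]
    have h1 : g a ≤ c := hm a (List.mem_cons_self)
    have h2 : mfold g L b ≤ c := ih (fun j hj => hm j (List.mem_cons_of_mem _ hj))
    simp only [mfold] at h2
    omega

theorem le_mfold_mem (g : Int → Int) (L : List Int) (b : Int) (j : Int) (hj : j ∈ L) :
    g j ≤ mfold g L b := by
  induction L with
  | nil => simp at hj
  | cons a L ih =>
    simp only [mfold, List.foldr_cons]
    rcases List.mem_cons.mp hj with rfl | hj'
    · exact le_max_left _ _
    · have := ih hj'
      simp only [mfold] at this
      omega

theorem mfold_base_max (g : Int → Int) (L : List Int) (b c : Int) (h : c ≤ b) :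
    mfold g L b = max (mfold g L c) b := by
  induction L with
  | nil => simp [mfold]; omega
  | cons a L ih =>
    simp only [mfold, List.foldr_cons]
    simp only [mfold] at ih
    rw [ih]
    rw [max_assoc]

-- Processing a strictly decreasing position list: closed form of the abstract fold.
theorem foldr_astep_char (f : Int → Int) : ∀ (M : List Int), M.Pairwise (· < ·) → ∀ (x : Int),
    (M.foldr (fun j h => astep h j) f) x
      = mfold (fun j => f j + 1) (M.filter (fun j => decide (j < x))) (f x) := by
  intro M
  induction M with
  | nil => intro _ x; simp [mfold]
  | cons j0 M ih =>
    intro hpw x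
    obtain ⟨hj0, hM⟩ := List.pairwise_cons.mp hpw
    have hbase : (M.foldr (fun j h => astep h j) f) j0 = f j0 := by
      rw [ih hM j0]
      have hnil : M.filter (fun j => decide (j < j0)) = [] := by
        rw [List.filter_eq_nil_iff]
        intro a ha
        have := hj0 a ha
        simp only [decide_eq_true_eq]
        omega
      rw [hnil]
      rfl
    simp only [List.foldr_cons]
    show astep (M.foldr (fun j h => astep h j) f) j0 x = _
    rw [List.filter_cons]
    simp only [astep]
    by_cases hjx : j0 < x
    · rw [if_neg (by omega), if_pos (by simpa using hjx)]
      rw [ih hM x, hbase]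
      show _ = max (f j0 + 1) _
      rw [max_comm]
      rfl
    · rw [if_pos (by omega), if_neg (by simpa using hjx)]
      exact ih hM x

-- The match-position list of a word in the final transcript.
def matchL (wf : List String) (w : String) : List Int :=
  ((PySem.List.enumerate wf 0).filter (fun jw => jw.2 == w)).map (·.1)

theorem matchL_pairwise (wf : List String) (w : String) : (matchL wf w).Pairwise (· < ·) := by
  unfold matchL
  rw [List.pairwise_map]
  exact (PySem.List.pairwise_lt_enumerate wf 0).filter _

theorem mem_matchL (wf : List String) (w : String) (j : Int) :
    j ∈ matchL wf w ↔ 0 ≤ j ∧ j < (wf.length : Int) ∧ wf.getD j.toNat "" = w := by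
  unfold matchL
  rw [List.mem_map]
  constructor
  · rintro ⟨p, hp, rfl⟩
    rw [List.mem_filter] at hp
    obtain ⟨hmem, hw⟩ := hp
    obtain ⟨k, hk, rfl⟩ := (PySem.List.mem_enumerate_iff _ _ _).mp hmem
    simp only [beq_iff_eq] at hw
    refine ⟨by omega, by omega, ?_⟩
    have ht : ((0 : Int) + (k : Int)).toNat = k := by omega
    rw [ht, List.getD_eq_getElem?_getD, List.getElem?_eq_getElem hk]
    exact hw
  · rintro ⟨h0, hlt, heq⟩
    have hk : j.toNat < wf.length := by omega
    refine ⟨((0 : Int) + (j.toNat : Int), wf[j.toNat]), ?_, by omega⟩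
    rw [List.mem_filter]
    constructor
    · exact (PySem.List.mem_enumerate_iff _ _ _).mpr ⟨j.toNat, hk, rfl⟩
    · simp only [beq_iff_eq]
      rw [List.getD_eq_getElem?_getD, List.getElem?_eq_getElem hk] at heq
      exact heq

-- The position dictionary of the port returns exactly the match lists.
theorem posDict_getD (wf : List String) (w : String) :
    (((PySem.List.enumerate wf 0).foldl
        (fun d jw => d.modify jw.2 [] (· ++ [jw.1])) PySem.Dict.empty).getD w [])
      = matchL wf w := by
  have h1 : (PySem.List.enumerate wf 0).foldl
      (fun d jw => d.modify jw.2 [] (· ++ [jw.1])) (PySem.Dict.empty (κ := String) (ν := List Int))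
      = ((PySem.List.enumerate wf 0).map Prod.swap).foldl
          (fun d p => d.modify p.1 [] (· ++ [p.2])) PySem.Dict.empty := by
    rw [List.foldl_map]
    simp only [Prod.fst_swap, Prod.snd_swap]
  rw [h1, PySem.Dict.getD_foldl_modify_append, PySem.Dict.getD_empty]
  unfold matchL
  rw [List.filter_map, List.map_map, List.nil_append]
  rfl

-- The closed form of the abstract fold over a full match list is the next lcsP row.
theorem val_row_nat (wi wf : List String) (i : Nat) : ∀ (xn : Nat), xn ≤ wf.length →
    mfold (fun j => lcsP wi wf i j.toNat + 1)
        ((matchL wf (wi.getD i "")).filter (fun j => decide (j < (xn : Int)))) (lcsP wi wf i xn)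
      = lcsP wi wf (i+1) xn := by
  intro xn
  induction xn with
  | zero =>
    intro _
    have hnil : (matchL wf (wi.getD i "")).filter (fun j => decide (j < ((0:Nat) : Int))) = [] := by
      rw [List.filter_eq_nil_iff]
      intro a ha
      have := (mem_matchL wf _ a).mp ha
      simp only [decide_eq_true_eq]
      omega
    rw [hnil]
    show lcsP wi wf i 0 = lcsP wi wf (i+1) 0
    rw [lcsP_zero_right, lcsP_zero_right]
  | succ xn ih =>
    intro hxn1
    have hxn : xn < wf.length := by omega
    by_cases hcw : wf.getD xn "" = wi.getD i ""
    · have hrhs : lcsP wi wf (i+1) (xn+1) = lcsP wi wf i xn + 1 := by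
        rw [lcsP, if_pos hcw.symm]
      rw [hrhs]
      apply le_antisymm
      · apply mfold_le
        · intro j hj
          rw [List.mem_filter] at hj
          obtain ⟨hjm, hjx⟩ := hj
          obtain ⟨hj0, hjlen, hjw⟩ := (mem_matchL wf _ j).mp hjm
          simp only [decide_eq_true_eq] at hjx
          have hjt : j.toNat ≤ xn := by omega
          have := lcsP_mono_le wi wf i hjt
          omega
        · have := (lcsP_QP' wi wf (i + xn) i xn le_rfl).1
          omega
      · have hmem : ((xn : Nat) : Int) ∈
            (matchL wf (wi.getD i "")).filter (fun j => decide (j < ((xn+1 : Nat) : Int))) := by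
          rw [List.mem_filter]
          refine ⟨(mem_matchL wf _ _).mpr ⟨by omega, by omega, ?_⟩, by
            simp only [decide_eq_true_eq]; push_cast; omega⟩
          rw [Int.toNat_natCast]
          exact hcw
        have hle := le_mfold_mem (fun j => lcsP wi wf i j.toNat + 1) _
          (lcsP wi wf i (xn+1)) _ hmem
        simpa using hle
    · have hfe : (matchL wf (wi.getD i "")).filter (fun j => decide (j < ((xn+1:Nat) : Int)))
          = (matchL wf (wi.getD i "")).filter (fun j => decide (j < ((xn:Nat) : Int))) := by
        apply List.filter_congr
        intro j hj
        obtain ⟨hj0, hjlen, hjw⟩ := (mem_matchL wf _ j).mp hj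
        have hne : j ≠ ((xn:Nat):Int) := by
          intro hcon
          subst hcon
          rw [Int.toNat_natCast] at hjw
          exact hcw hjw
        simp only [decide_eq_decide]
        push_cast
        omega
      rw [hfe, mfold_base_max _ _ _ (lcsP wi wf i xn) ((lcsP_PQ' wi wf (i+xn) i xn le_rfl).1),
        ih (by omega)]
      have hrhs : lcsP wi wf (i+1) (xn+1) = max (lcsP wi wf i (xn+1)) (lcsP wi wf (i+1) xn) := by
        rw [lcsP, if_neg (fun hcc => hcw hcc.symm)]
      rw [hrhs, max_comm]

-- Processing one interim word advances the count function by one lcsP row.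
theorem word_step (wi wf : List String) (i : Nat) (t : List Int)
    (hs : SInvP (wf.length : Int) t)
    (hcnt : ∀ x : Int, 0 ≤ x → x ≤ (wf.length : Int) → cntf t x = lcsP wi wf i x.toNat) :
    SInvP (wf.length : Int) (((matchL wf (wi.getD i "")).reverse).foldl pstep t) ∧
    ∀ x : Int, 0 ≤ x → x ≤ (wf.length : Int) →
      cntf (((matchL wf (wi.getD i "")).reverse).foldl pstep t) x = lcsP wi wf (i+1) x.toNat := by
  have hmem : ∀ j ∈ (matchL wf (wi.getD i "")).reverse, 0 ≤ j ∧ j < (wf.length:Int) := by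
    intro j hj
    rw [List.mem_reverse] at hj
    have := (mem_matchL wf _ j).mp hj
    exact ⟨this.1, this.2.1⟩
  obtain ⟨hfin, hcnt'⟩ := fold_pstep_spec (wf.length:Int)
    ((matchL wf (wi.getD i "")).reverse) t hs hmem
  refine ⟨hfin, ?_⟩
  intro x hx0 hxn
  rw [hcnt' x]
  rw [afold_congr (wf.length:Int) ((matchL wf (wi.getD i "")).reverse) (cntf t)
      (fun y => lcsP wi wf i y.toNat) hcnt hmem x hx0 hxn]
  rw [List.foldl_reverse]
  rw [foldr_astep_char (fun y => lcsP wi wf i y.toNat) (matchL wf (wi.getD i ""))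
      (matchL_pairwise wf _) x]
  have hxe : x = ((x.toNat : Nat) : Int) := by omega
  rw [hxe]
  simp only [Int.toNat_natCast]
  exact val_row_nat wi wf i x.toNat (by omega)

-- The outer fold over all interim words.
theorem outer_fold (wi wf : List String) : ∀ (rest : List String) (i : Nat) (t : List Int),
    wi.drop i = rest → i ≤ wi.length →
    SInvP (wf.length : Int) t →
    (∀ x : Int, 0 ≤ x → x ≤ (wf.length : Int) → cntf t x = lcsP wi wf i x.toNat) →
    SInvP (wf.length : Int) (rest.foldl (fun t w => ((matchL wf w).reverse).foldl pstep t) t) ∧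
    ∀ x : Int, 0 ≤ x → x ≤ (wf.length : Int) →
      cntf (rest.foldl (fun t w => ((matchL wf w).reverse).foldl pstep t) t) x
        = lcsP wi wf wi.length x.toNat := by
  intro rest
  induction rest with
  | nil =>
    intro i t hdrop hile hs hcnt
    have hieq : i = wi.length := by
      have := List.drop_eq_nil_iff.mp hdrop
      omega
    subst hieq
    exact ⟨hs, hcnt⟩
  | cons w rest ih =>
    intro i t hdrop hile hs hcnt
    have hilt : i < wi.length := by
      by_contra h
      rw [List.drop_eq_nil_of_le (by omega)] at hdrop
      simp at hdrop
    have hw : wi.getD i "" = w := by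
      have h1 : (wi.drop i).getD 0 "" = w := by rw [hdrop]; rfl
      rw [List.getD_eq_getElem?_getD] at h1 ⊢
      rwa [List.getElem?_drop, Nat.add_zero] at h1
    have hdrop' : wi.drop (i+1) = rest := by
      have h1 := congrArg (List.drop 1) hdrop
      rw [List.drop_drop] at h1
      simpa [Nat.add_comm] using h1
    simp only [List.foldl_cons]
    rw [← hw]
    have hws := word_step wi wf i t hs hcnt
    exact ih (i+1) _ hdrop' (by omega) hws.1 hws.2

-- B always computes len(w_i) - lcsP m n.
theorem alt_eq (interim final : String) :
    count_changed_words_py_alt interim final =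
      ((PySem.Str.split₀ (PySem.Str.lower interim)).length : Int) -
        lcsP (PySem.Str.split₀ (PySem.Str.lower interim)) (PySem.Str.split₀ (PySem.Str.lower final))
          (PySem.Str.split₀ (PySem.Str.lower interim)).length
          (PySem.Str.split₀ (PySem.Str.lower final)).length := by
  simp only [count_changed_words_py_alt]
  set wi := PySem.Str.split₀ (PySem.Str.lower interim) with hwi
  set wf := PySem.Str.split₀ (PySem.Str.lower final) with hwf
  have hstep : (fun (tails : List Int) (w : String) =>
      (((((PySem.List.enumerate wf 0).foldl
        (fun d jw => d.modify jw.2 [] (· ++ [jw.1])) PySem.Dict.empty)).getD w []).reverse).foldl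
        (fun tails j =>
          let lo := pvBsearch tails j 0 tails.length
          if lo = (tails.length : Int) then tails ++ [j]
          else PySem.List.pySetD tails lo j) tails)
      = (fun t w => ((matchL wf w).reverse).foldl pstep t) := by
    funext t w
    rw [posDict_getD]
    rfl
  rw [hstep]
  obtain ⟨hfin, hcnt⟩ := outer_fold wi wf wi 0 [] (List.drop_zero) (Nat.zero_le _)
    ⟨List.Pairwise.nil, fun e he => absurd he (List.not_mem_nil)⟩
    (fun x hx0 hxn => by simp [cntf, lcsP_zero])
  set T := wi.foldl (fun t w => ((matchL wf w).reverse).foldl pstep t) ([] : List Int) with hT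
  have h1 : cntf T (wf.length : Int) = lcsP wi wf wi.length wf.length := by
    have := hcnt (wf.length : Int) (Int.natCast_nonneg _) le_rfl
    rwa [Int.toNat_natCast] at this
  have h2 : T.countP (fun e => decide (e < (wf.length:Int))) = T.length := by
    rw [List.countP_eq_length]
    intro e he
    have := hfin.2 e he
    simp only [decide_eq_true_eq]
    exact this.2
  have h3 : (T.length : Int) = lcsP wi wf wi.length wf.length := by
    rw [← h1]
    simp [cntf, h2]
  rw [h3]

-- ===== VERDICT (by name: the statement is the Claim_ definition above) =====
theorem count_changed_words_py_spec : Claim_equal_count_changed_words_py := by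
  intro interim final _
  unfold Spec_count_changed_words_py
  rw [a_eq, alt_eq]
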